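-- pv_equiv track=rewrite | github.com/andrepbento/OpenTracingProcessor | Graphy/graphy/utils/list.py | tuple_list
-- ===== SOURCE A (Python) =====
-- def tuple_list(values: list):
--     tuple_list_result = list()
--     aux_value = values[0]
--     for value in values:
--         if aux_value == value:
--             continue
--         tuple_list_result.append((aux_value, value))
--         aux_value = value
--     return tuple_list_result
-- ===== SOURCE B (Python) =====
-- def tuple_list(values: list):
--     compressed = []
--     for value in values:
--         if not compressed or compressed[-1] != value:
--             compressed.append(value)
--     return list(zip(compressed, compressed[1:]))
-- ===== Notes on version B (the rewrite author's own statement) =====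
-- stated objective: alternative
-- what changed: Two staged passes instead of A's single accumulator loop: first run-length-compress consecutive duplicates into a separate list, then pair ALL adjacent elements of the compressed list unconditionally with zip (no filtering of pairs).
import Mathlib
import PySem

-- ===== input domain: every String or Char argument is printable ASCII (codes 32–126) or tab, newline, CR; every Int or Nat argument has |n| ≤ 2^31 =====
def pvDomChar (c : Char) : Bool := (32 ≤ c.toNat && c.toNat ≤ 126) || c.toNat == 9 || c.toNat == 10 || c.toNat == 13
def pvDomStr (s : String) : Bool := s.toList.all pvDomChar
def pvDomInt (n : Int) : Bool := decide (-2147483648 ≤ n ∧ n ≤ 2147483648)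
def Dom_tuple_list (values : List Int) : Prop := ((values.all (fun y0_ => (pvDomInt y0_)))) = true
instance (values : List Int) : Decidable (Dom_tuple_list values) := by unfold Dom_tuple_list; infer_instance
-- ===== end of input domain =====

-- B is a staged re-decomposition: run-length-compress consecutive duplicates, then zip the
-- compressed list with its tail (no filtering), instead of A's single aux-accumulator loop (objective: alternative).
-- ===== PORT A =====
-- A's loop: aux_value starts at values[0]; a value equal to aux_value is skipped,
-- otherwise (aux_value, value) is appended and aux_value becomes value.
def tuple_list (values : List Int) : List (Int × Int) :=
  match PySem.List.pyGet? values 0 with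
  | none => []   -- unreachable under Pre_ (Python raises IndexError here)
  | some a0 =>
    (values.foldl
      (fun (st : List (Int × Int) × Int) v =>
        if st.2 == v then st else (st.1 ++ [(st.2, v)], v))
      ([], a0)).1

-- ===== PORT B =====
-- pass 1: compressed = consecutive-duplicate-free copy; pass 2: zip(compressed, compressed[1:])
def tuple_list_alt (values : List Int) : List (Int × Int) :=
  let compressed := values.foldl
    (fun (acc : List Int) value =>
      if acc = [] ∨ PySem.List.pyGet? acc (-1) ≠ some value then acc ++ [value] else acc) []
  compressed.zip (PySem.List.slice compressed (some 1) none)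

-- ===== PRECONDITION & SPEC =====
-- Pre_ excludes only the empty list, on which A raises IndexError (values[0]).
def Pre_tuple_list (values : List Int) : Prop := values ≠ []
instance (values : List Int) : Decidable (Pre_tuple_list values) := by unfold Pre_tuple_list; infer_instance
def pvWitness_tuple_list : List Int := ([1, 1, 2, 3, 3, 2])

def Spec_tuple_list (values : List Int) (out : List (Int × Int)) : Prop := out = tuple_list_alt values
instance (values : List Int) (out : List (Int × Int)) : Decidable (Spec_tuple_list values out) := by unfold Spec_tuple_list; infer_instance

-- ===== CLAIM (what is proved, stated in full; the proofs are below) =====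
def Claim_equal_tuple_list : Prop := ∀ (values : List Int), Dom_tuple_list values → Pre_tuple_list values → Spec_tuple_list values (tuple_list values)

-- ===== LEMMAS AND PROOFS =====

-- canonical tail of the run-compressed list headed (conceptually) by a
def crTail (a : Int) : List Int → List Int
  | [] => []
  | v :: l => if a = v then crTail a l else v :: crTail v l

-- A-side invariant: folding A's step over l with accumulator acc and aux a yields
-- acc followed by the adjacent pairs of the compressed sequence a :: crTail a l.
theorem tuple_list_fold_eq (l : List Int) (a : Int) (acc : List (Int × Int)) :
    (l.foldl (fun (st : List (Int × Int) × Int) v =>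
        if st.2 == v then st else (st.1 ++ [(st.2, v)], v)) (acc, a)).1
      = acc ++ ((a :: crTail a l).zip (crTail a l)) := by
  induction l generalizing a acc with
  | nil => simp [crTail]
  | cons v l ih =>
    by_cases h : a = v
    · subst h
      rw [List.foldl_cons, if_pos (by simp), ih]
      simp [crTail]
    · rw [List.foldl_cons, if_neg (by simp [h]), ih]
      simp [crTail, h]

-- B-side invariant: folding B's compression step over l onto a nonempty acc with last a
-- appends exactly crTail a l.
theorem compress_fold_eq (l : List Int) (a : Int) (acc : List Int) :
    (l.foldl (fun (acc : List Int) value =>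
        if acc = [] ∨ PySem.List.pyGet? acc (-1) ≠ some value then acc ++ [value] else acc)
      (acc ++ [a]))
      = (acc ++ [a]) ++ crTail a l := by
  induction l generalizing a acc with
  | nil => simp [crTail]
  | cons v l ih =>
    rw [List.foldl_cons]
    by_cases h : a = v
    · subst h
      rw [if_neg (by simp [PySem.List.pyGet?_neg_one])]
      rw [ih]
      simp [crTail]
    · rw [if_pos (by simp [PySem.List.pyGet?_neg_one, h])]
      rw [show (acc ++ [a]) ++ [v] = (acc ++ [a]) ++ [v] from rfl, ih]
      simp [crTail, h]

-- ===== VERDICT (by name: the statement is the Claim_ definition above) =====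
theorem tuple_list_spec : Claim_equal_tuple_list := by
  intro values _ hpre
  unfold Spec_tuple_list tuple_list tuple_list_alt
  cases values with
  | nil => exact absurd rfl hpre
  | cons a l =>
    simp only [show PySem.List.pyGet? (a :: l) 0 = some a from by
      simp [PySem.List.pyGet?, PySem.List.pyIdx?], List.foldl_cons]
    rw [if_pos (by simp), tuple_list_fold_eq]
    rw [if_pos (by simp)]
    rw [show ([] : List Int) ++ [a] = [] ++ [a] from rfl, compress_fold_eq]
    rw [PySem.List.slice_from_one]
    simp
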